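-- pv_equiv track=rewrite | github.com/zubairalam1997/Prolife_dashboard_TML_lucknow | finalbgfilefordashb ) (1).py | decode_plc_ascii
-- ===== SOURCE A (Python) =====
-- BYTE_ORDER = 'little'
--
-- def decode_plc_ascii(data):
--     result = []
--     for value in data:
--         lo = value & 0xFF
--         hi = (value >> 8) & 0xFF
--         chars = [lo, hi] if BYTE_ORDER == 'little' else [hi, lo]
--         for c in chars:
--             if c == 0:
--                 return ''.join(result)
--             if 32 <= c <= 126:
--                 result.append(chr(c))
--     return ''.join(result)
-- ===== SOURCE B (Python) =====
-- def _frag(v):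
--     # printable chars contributed by one word, stopping inside the word at a null byte
--     lo, hi = v & 0xFF, (v >> 8) & 0xFF
--     if lo == 0:
--         return ''
--     s = chr(lo) if 32 <= lo <= 126 else ''
--     if hi == 0 or not (32 <= hi <= 126):
--         return s
--     return s + chr(hi)
--
--
-- def _stops(v):
--     return v & 0xFF == 0 or (v >> 8) & 0xFF == 0
--
--
-- def decode_plc_ascii(data):
--     # word-granularity two-stage decode: first locate the terminating word (one whose
--     # lo or hi byte is null), then map every word up to and including it to its
--     # printable fragment and join -- no byte stream, no early return.
--     k = next((i for i, v in enumerate(data) if _stops(v)), len(data))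
--     return ''.join(map(_frag, data[:k + 1]))
-- ===== Notes on version B (the rewrite author's own statement) =====
-- stated objective: alternative
-- what changed: Replaced A's fused byte-level scan with early return by a word-granularity two-stage decode: first locate the terminating word (the first word whose lo or hi byte is null) with a findIdx pass, then map every kept word to its printable fragment and join.
import Mathlib
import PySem

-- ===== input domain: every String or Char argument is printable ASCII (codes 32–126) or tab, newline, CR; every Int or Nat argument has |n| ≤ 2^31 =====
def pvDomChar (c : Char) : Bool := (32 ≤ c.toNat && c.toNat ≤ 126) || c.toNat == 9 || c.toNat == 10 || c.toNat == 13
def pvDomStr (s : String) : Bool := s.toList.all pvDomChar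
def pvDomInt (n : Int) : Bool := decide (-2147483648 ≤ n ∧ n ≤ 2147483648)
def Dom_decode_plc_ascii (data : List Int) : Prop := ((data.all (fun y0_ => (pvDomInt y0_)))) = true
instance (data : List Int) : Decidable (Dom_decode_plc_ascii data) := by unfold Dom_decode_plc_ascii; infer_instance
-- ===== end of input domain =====

-- B replaces A's fused byte-level scan with early return by a word-granularity two-stage
-- decode: locate the terminating word first, then map every kept word to its printable
-- fragment and join (objective: alternative decomposition; return values identical).

-- ===== PORT A =====
-- A's fused loop: per word, lo then hi byte, early return at a null byte, append printable chars.
-- value & 0xFF = value.emod 256 and (value >> 8) & 0xFF = (floordiv value 256).emod 256: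
-- exact for all Ints (Python's & / >> on negatives are two's-complement = floored arithmetic).
def decode_plc_ascii_go : List Int → List Char → String
  | [], acc => String.ofList acc.reverse
  | v :: rest, acc =>
    let lo := v.emod 256
    let hi := (PySem.Int.floordiv v 256).emod 256
    if lo = 0 then String.ofList acc.reverse
    else
      let acc1 := if 32 ≤ lo ∧ lo ≤ 126 then Char.ofNat lo.toNat :: acc else acc
      if hi = 0 then String.ofList acc1.reverse
      else decode_plc_ascii_go rest (if 32 ≤ hi ∧ hi ≤ 126 then Char.ofNat hi.toNat :: acc1 else acc1)

def decode_plc_ascii (data : List Int) : String := decode_plc_ascii_go data []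

-- ===== PORT B =====
-- _frag: the printable characters one word contributes (stops inside the word at a null byte)
def pvFrag (v : Int) : String :=
  let lo := v.emod 256
  let hi := (PySem.Int.floordiv v 256).emod 256
  if lo = 0 then ""
  else
    let s := if 32 ≤ lo ∧ lo ≤ 126 then String.singleton (Char.ofNat lo.toNat) else ""
    if hi = 0 ∨ ¬(32 ≤ hi ∧ hi ≤ 126) then s
    else s ++ String.singleton (Char.ofNat hi.toNat)

-- _stops: does this word contain a null byte (terminating the whole string)?
def pvStops (v : Int) : Bool :=
  v.emod 256 == 0 || (PySem.Int.floordiv v 256).emod 256 == 0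

-- next((i for i, v in enumerate(data) if _stops(v)), len(data)) = List.findIdx
-- (both return the length when no word stops); data[:k+1] with k+1 ≥ 1 is List.take (k+1);
-- ''.join = PySem.Str.join "".
def decode_plc_ascii_alt (data : List Int) : String :=
  let k := data.findIdx pvStops
  PySem.Str.join "" ((data.take (k + 1)).map pvFrag)

-- ===== PRECONDITION & SPEC =====
def Spec_decode_plc_ascii (data : List Int) (out : String) : Prop := out = decode_plc_ascii_alt data
instance (data : List Int) (out : String) : Decidable (Spec_decode_plc_ascii data out) := by unfold Spec_decode_plc_ascii; infer_instance

-- ===== CLAIM (what is proved, stated in full; the proofs are below) =====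
def Claim_equal_decode_plc_ascii : Prop := ∀ (data : List Int), Dom_decode_plc_ascii data → Spec_decode_plc_ascii data (decode_plc_ascii data)

-- ===== LEMMAS AND PROOFS =====

-- pvFrag at the char-list level
def pvFragL (v : Int) : List Char :=
  let lo := v.emod 256
  let hi := (PySem.Int.floordiv v 256).emod 256
  (if ¬lo = 0 ∧ 32 ≤ lo ∧ lo ≤ 126 then [Char.ofNat lo.toNat] else []) ++
  (if ¬lo = 0 ∧ ¬hi = 0 ∧ 32 ≤ hi ∧ hi ≤ 126 then [Char.ofNat hi.toNat] else [])

theorem pv_toList_frag (v : Int) : (pvFrag v).toList = pvFragL v := by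
  have hfd : PySem.Int.floordiv v 256 = v / 256 := PySem.Int.floordiv_eq_ediv_of_pos (by norm_num)
  unfold pvFrag pvFragL
  simp only [hfd]
  by_cases hlo : v.emod 256 = 0 <;>
    by_cases hhi : (v / 256).emod 256 = 0 <;>
    by_cases plo : 32 ≤ v.emod 256 ∧ v.emod 256 ≤ 126 <;>
    by_cases phi : 32 ≤ (v / 256).emod 256 ∧ (v / 256).emod 256 ≤ 126 <;>
    simp [hlo, hhi, plo, phi]

-- joining with the empty separator is flattening
theorem pv_join_empty (L : List (List Char)) : PySem.Chars.join [] L = L.flatten := by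
  show List.intercalate [] L = L.flatten
  induction L with
  | nil => simp [List.intercalate]
  | cons a L ih =>
    cases L with
    | nil => simp [List.intercalate]
    | cons b M =>
      rw [show List.intercalate ([] : List Char) (a :: b :: M)
            = a ++ List.intercalate [] (b :: M) by simp [List.intercalate, List.intersperse], ih]
      simp

-- B at the char-list level
def pvAltL (data : List Int) : List Char :=
  ((data.take (data.findIdx pvStops + 1)).map pvFragL).flatten

theorem pv_alt_toList (data : List Int) : (decode_plc_ascii_alt data).toList = pvAltL data := by
  unfold decode_plc_ascii_alt pvAltL
  have hf : String.toList ∘ pvFrag = pvFragL := funext pv_toList_frag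
  simp [PySem.Str.join, pv_join_empty, hf]

theorem pv_altL_cons (v : Int) (rest : List Int) :
    pvAltL (v :: rest) = if pvStops v then pvFragL v else pvFragL v ++ pvAltL rest := by
  unfold pvAltL
  by_cases h : pvStops v <;> simp [List.findIdx_cons, h]

theorem pv_go_eq (data : List Int) (acc : List Char) :
    decode_plc_ascii_go data acc = String.ofList (acc.reverse ++ pvAltL data) := by
  induction data generalizing acc with
  | nil => simp [decode_plc_ascii_go, pvAltL]
  | cons v rest ih =>
    have hfd : PySem.Int.floordiv v 256 = v / 256 := PySem.Int.floordiv_eq_ediv_of_pos (by norm_num)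
    rw [pv_altL_cons]
    simp only [decode_plc_ascii_go, hfd]
    by_cases hlo : v.emod 256 = 0
    · simp [pvStops, pvFragL, hlo]
    · by_cases hhi : (v / 256).emod 256 = 0
      · by_cases plo : 32 ≤ v.emod 256 ∧ v.emod 256 ≤ 126 <;>
          simp [pvStops, pvFragL, hlo, hhi, plo]
      · rw [if_neg hlo, if_neg hhi, ih]
        by_cases plo : 32 ≤ v.emod 256 ∧ v.emod 256 ≤ 126 <;>
          by_cases phi : 32 ≤ (v / 256).emod 256 ∧ (v / 256).emod 256 ≤ 126 <;>
          simp [pvStops, pvFragL, hlo, hhi, plo, phi]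

-- ===== VERDICT (by name: the statement is the Claim_ definition above) =====
theorem decode_plc_ascii_spec : Claim_equal_decode_plc_ascii := by
  intro data _
  unfold Spec_decode_plc_ascii decode_plc_ascii
  rw [pv_go_eq]
  have h := pv_alt_toList data
  rw [← h]
  simp
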